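-- pv_equiv track=rewrite | github.com/sbomify/github-action | sbomify_action/_hash_enrichment/parsers/pipfile_lock.py | _select_best_hash
-- ===== SOURCE A (Python) =====
-- def _select_best_hash(hash_strings: list[str]) -> str | None:
--     """Select the best hash from available hashes.
--
--     Prefers stronger algorithms: SHA-512 > SHA-384 > SHA-256 > SHA-1 > MD5.
--     """
--     if not hash_strings:
--         return None
--
--     # Priority order (higher is better)
--     priority = {
--         "sha512": 5,
--         "sha384": 4,
--         "sha256": 3,
--         "sha1": 2,
--         "md5": 1,
--     }
--
--     best_hash = None
--     best_priority = 0
--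
--     for hash_str in hash_strings:
--         if ":" not in hash_str:
--             continue
--         prefix = hash_str.split(":")[0].lower()
--         hash_priority = priority.get(prefix, 0)
--         if hash_priority > best_priority:
--             best_priority = hash_priority
--             best_hash = hash_str
--
--     return best_hash or (hash_strings[0] if hash_strings else None)
-- ===== SOURCE B (Python) =====
-- def _select_best_hash(hash_strings: list[str]) -> str | None:
--     for algo in ["sha512", "sha384", "sha256", "sha1", "md5"]:
--         for h in hash_strings:
--             if ":" in h and h.split(":")[0].lower() == algo:
--                 return h
--     return hash_strings[0] if hash_strings else None
-- ===== Notes on version B (the rewrite author's own statement) =====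
-- stated objective: alternative
-- what changed: Inverts the loop structure: instead of a single pass maintaining (best_hash, best_priority) against a priority dict, B loops over algorithm names in priority order and rescans the hash list for the first match at each level, returning immediately.
import Mathlib
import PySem

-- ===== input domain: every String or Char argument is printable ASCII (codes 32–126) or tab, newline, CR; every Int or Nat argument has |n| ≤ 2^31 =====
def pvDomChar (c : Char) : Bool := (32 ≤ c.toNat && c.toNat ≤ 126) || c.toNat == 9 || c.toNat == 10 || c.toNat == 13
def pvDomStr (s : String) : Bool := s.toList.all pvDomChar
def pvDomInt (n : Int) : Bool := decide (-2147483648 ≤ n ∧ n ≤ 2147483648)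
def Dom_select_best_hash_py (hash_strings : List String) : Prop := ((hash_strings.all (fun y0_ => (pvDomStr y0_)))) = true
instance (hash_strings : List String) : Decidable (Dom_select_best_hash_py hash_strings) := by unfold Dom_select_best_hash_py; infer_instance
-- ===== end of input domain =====

-- B inverts A's structure: an outer loop over algorithm names in priority order with an inner
-- rescan of the hashes, instead of A's single pass with a running (best_hash, best_priority);
-- objective: alternative decomposition (same return value, similar cost).

-- ===== PORT A =====
-- the literal priority dict of A
def pvPriorityDict : PySem.Dict String Int :=
  ((((PySem.Dict.empty.insert "sha512" 5).insert "sha384" 4).insert "sha256" 3).insert "sha1" 2).insert "md5" 1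

-- one iteration of A's loop over hash_strings, state = (best_hash, best_priority)
def pvStepA (st : Option String × Int) (hash_str : String) : Option String × Int :=
  if PySem.Str.isIn ":" hash_str = false then st
  else
    -- hash_str.split(":")[0].lower(); the split result is always non-empty, so [0] is headD
    let prefix_ := PySem.Str.lower (((PySem.Str.split? hash_str ":").getD []).headD "")
    let hash_priority := pvPriorityDict.getD prefix_ 0
    if hash_priority > st.2 then (some hash_str, hash_priority) else st

def select_best_hash_py (hash_strings : List String) : Option String :=
  if hash_strings.isEmpty then none
  else
    let st := hash_strings.foldl pvStepA (none, 0)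
    -- 'best_hash or (hash_strings[0] if hash_strings else None)': a falsy best_hash (None or "")
    -- falls back to the first element (hash_strings is non-empty in this branch)
    match st.1 with
    | some s => if s = "" then hash_strings.head? else some s
    | none => hash_strings.head?

-- ===== PORT B =====
-- does hash h carry algorithm algo? (":" in h and h.split(":")[0].lower() == algo)
def pvAlgoMatches (algo : String) (h : String) : Bool :=
  PySem.Str.isIn ":" h && (PySem.Str.lower (((PySem.Str.split? h ":").getD []).headD "") == algo)

-- the inner 'for h in hash_strings: … return h'
def pvFindAlgo (algo : String) : List String → Option String
  | [] => none
  | h :: t => if pvAlgoMatches algo h then some h else pvFindAlgo algo t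

-- the outer 'for algo in [...]'
def pvScan (hash_strings : List String) : List String → Option String
  | [] => none
  | a :: rest =>
    match pvFindAlgo a hash_strings with
    | some h => some h
    | none => pvScan hash_strings rest

def select_best_hash_py_alt (hash_strings : List String) : Option String :=
  match pvScan hash_strings ["sha512", "sha384", "sha256", "sha1", "md5"] with
  | some h => some h
  | none => hash_strings.head?

-- ===== PRECONDITION & SPEC =====
def Spec_select_best_hash_py (hash_strings : List String) (out : Option String) : Prop := out = select_best_hash_py_alt hash_strings
instance (hash_strings : List String) (out : Option String) : Decidable (Spec_select_best_hash_py hash_strings out) := by unfold Spec_select_best_hash_py; infer_instance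

-- ===== CLAIM (what is proved, stated in full; the proofs are below) =====
def Claim_equal_select_best_hash_py : Prop := ∀ (hash_strings : List String), Dom_select_best_hash_py hash_strings → Spec_select_best_hash_py hash_strings (select_best_hash_py hash_strings)

-- ===== LEMMAS AND PROOFS =====

-- the priority of a hash string (0 when no ":" or unknown algorithm)
def pvPrio (s : String) : Int :=
  if pvAlgoMatches "sha512" s then 5
  else if pvAlgoMatches "sha384" s then 4
  else if pvAlgoMatches "sha256" s then 3
  else if pvAlgoMatches "sha1" s then 2
  else if pvAlgoMatches "md5" s then 1
  else 0

def pvMaxPrio (l : List String) : Int := l.foldr (fun s m => max (pvPrio s) m) 0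

lemma pvPrio_le_five (s : String) : pvPrio s ≤ 5 := by
  unfold pvPrio; split_ifs <;> norm_num

lemma pvAlgoMatches_excl {a b s : String} (ha : pvAlgoMatches a s = true)
    (hb : pvAlgoMatches b s = true) : a = b := by
  unfold pvAlgoMatches at ha hb
  simp only [Bool.and_eq_true, beq_iff_eq] at ha hb
  rw [← ha.2, ← hb.2]

lemma pvDict_getD (q : String) :
    pvPriorityDict.getD q 0 =
      if q == "sha512" then 5 else if q == "sha384" then 4 else if q == "sha256" then 3
      else if q == "sha1" then 2 else if q == "md5" then 1 else 0 := by
  simp only [pvPriorityDict, PySem.Dict.getD_insert, PySem.Dict.getD_empty, beq_iff_eq]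
  split_ifs <;> simp_all

lemma pvStepA_eq (st : Option String × Int) (s : String) (h : 0 ≤ st.2) :
    pvStepA st s = if pvPrio s > st.2 then (some s, pvPrio s) else st := by
  unfold pvStepA pvPrio pvAlgoMatches
  cases hin : PySem.Str.isIn ":" s with
  | false =>
    simp only [Bool.false_and, Bool.false_eq_true, if_false]
    rw [if_pos trivial, if_neg (by omega : ¬ (0 : Int) > st.2)]
  | true =>
    simp only [Bool.true_and]
    rw [if_neg (by simp : ¬ (true = false))]
    rw [pvDict_getD]

lemma pvPrio_nonneg (s : String) : 0 ≤ pvPrio s := by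
  unfold pvPrio; split_ifs <;> norm_num

lemma pvMaxPrio_cons (s : String) (t : List String) :
    pvMaxPrio (s :: t) = max (pvPrio s) (pvMaxPrio t) := rfl

def pvStepF (st : Option String × Int) (s : String) : Option String × Int :=
  if pvPrio s > st.2 then (some s, pvPrio s) else st

lemma foldl_stepA_eq_stepF (l : List String) (b : Option String) (p : Int) (hp : 0 ≤ p) :
    l.foldl pvStepA (b, p) = l.foldl pvStepF (b, p) := by
  induction l generalizing b p with
  | nil => rfl
  | cons s t ih =>
    simp only [List.foldl_cons]
    rw [pvStepA_eq (b, p) s hp]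
    unfold pvStepF
    split_ifs with h
    · exact ih _ _ (le_of_lt (lt_of_le_of_lt hp h))
    · exact ih _ _ hp

lemma foldl_stepF_unchanged (l : List String) (b : Option String) (p : Int)
    (h : pvMaxPrio l ≤ p) : l.foldl pvStepF (b, p) = (b, p) := by
  induction l generalizing b with
  | nil => rfl
  | cons s t ih =>
    rw [pvMaxPrio_cons, max_le_iff] at h
    simp only [List.foldl_cons, pvStepF]
    rw [if_neg (by omega : ¬ pvPrio s > p)]
    exact ih b h.2

lemma foldl_stepF_found (l : List String) (b : Option String) (p : Int)
    (hp : 0 ≤ p) (h : p < pvMaxPrio l) :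
    (l.foldl pvStepF (b, p)).1 = l.find? (fun s => pvPrio s == pvMaxPrio l) := by
  induction l generalizing b p with
  | nil => simp only [pvMaxPrio, List.foldr_nil] at h; omega
  | cons s t ih =>
    rw [pvMaxPrio_cons] at h ⊢
    have hl1 := le_max_left (pvPrio s) (pvMaxPrio t)
    have hl2 := le_max_right (pvPrio s) (pvMaxPrio t)
    simp only [List.foldl_cons, pvStepF]
    by_cases hs : pvPrio s > p
    · rw [if_pos hs]
      by_cases hts : pvMaxPrio t ≤ pvPrio s
      · have hmax : max (pvPrio s) (pvMaxPrio t) = pvPrio s := max_eq_left hts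
        rw [hmax]
        rw [foldl_stepF_unchanged t (some s) (pvPrio s) hts]
        rw [List.find?_cons_of_pos (by simp)]
      · have hmax : max (pvPrio s) (pvMaxPrio t) = pvMaxPrio t := max_eq_right (by omega)
        rw [hmax]
        rw [List.find?_cons_of_neg (by simp only [beq_iff_eq]; omega)]
        exact ih _ _ (pvPrio_nonneg s) (by omega)
    · rw [if_neg hs]
      have hmax : max (pvPrio s) (pvMaxPrio t) = pvMaxPrio t := max_eq_right (by omega)
      rw [hmax]
      rw [List.find?_cons_of_neg (by simp only [beq_iff_eq]; omega)]
      exact ih _ _ hp (by omega)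

-- B side
lemma pvFindAlgo_eq_find? (a : String) (l : List String) :
    pvFindAlgo a l = l.find? (pvAlgoMatches a) := by
  induction l with
  | nil => rfl
  | cons h t ih =>
    simp only [pvFindAlgo, List.find?_cons]
    by_cases hm : pvAlgoMatches a h <;> simp [hm, ih]

lemma pvAlgoMatches_iff_prio (s : String) :
    (pvAlgoMatches "sha512" s = (pvPrio s == 5)) ∧
    (pvAlgoMatches "sha384" s = (pvPrio s == 4)) ∧
    (pvAlgoMatches "sha256" s = (pvPrio s == 3)) ∧
    (pvAlgoMatches "sha1" s = (pvPrio s == 2)) ∧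
    (pvAlgoMatches "md5" s = (pvPrio s == 1)) := by
  unfold pvPrio
  by_cases h5 : pvAlgoMatches "sha512" s <;>
  by_cases h4 : pvAlgoMatches "sha384" s <;>
  by_cases h3 : pvAlgoMatches "sha256" s <;>
  by_cases h2 : pvAlgoMatches "sha1" s <;>
  by_cases h1 : pvAlgoMatches "md5" s <;>
    first
    | (exfalso
       first
       | exact absurd (pvAlgoMatches_excl h5 h4) (by decide)
       | exact absurd (pvAlgoMatches_excl h5 h3) (by decide)
       | exact absurd (pvAlgoMatches_excl h5 h2) (by decide)
       | exact absurd (pvAlgoMatches_excl h5 h1) (by decide)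
       | exact absurd (pvAlgoMatches_excl h4 h3) (by decide)
       | exact absurd (pvAlgoMatches_excl h4 h2) (by decide)
       | exact absurd (pvAlgoMatches_excl h4 h1) (by decide)
       | exact absurd (pvAlgoMatches_excl h3 h2) (by decide)
       | exact absurd (pvAlgoMatches_excl h3 h1) (by decide)
       | exact absurd (pvAlgoMatches_excl h2 h1) (by decide))
    | simp [h5, h4, h3, h2, h1]

lemma pvPrio_le_maxPrio {s : String} {l : List String} (h : s ∈ l) : pvPrio s ≤ pvMaxPrio l := by
  induction l with
  | nil => cases h
  | cons x t ih =>
    rw [pvMaxPrio_cons]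
    have h1 := le_max_left (pvPrio x) (pvMaxPrio t)
    have h2 := le_max_right (pvPrio x) (pvMaxPrio t)
    rcases List.mem_cons.1 h with rfl | hm
    · omega
    · have := ih hm; omega

lemma pvMaxPrio_nonneg (l : List String) : 0 ≤ pvMaxPrio l := by
  induction l with
  | nil => norm_num [pvMaxPrio]
  | cons x t ih =>
    rw [pvMaxPrio_cons]
    have := le_max_right (pvPrio x) (pvMaxPrio t); omega

lemma pvMaxPrio_le_five (l : List String) : pvMaxPrio l ≤ 5 := by
  induction l with
  | nil => norm_num [pvMaxPrio]
  | cons x t ih =>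
    rw [pvMaxPrio_cons]
    have := pvPrio_le_five x
    have := max_le this ih
    omega

lemma pvExists_maxPrio {l : List String} (h : pvMaxPrio l ≠ 0) :
    ∃ s ∈ l, pvPrio s = pvMaxPrio l := by
  induction l with
  | nil => exact absurd rfl h
  | cons x t ih =>
    rw [pvMaxPrio_cons] at h ⊢
    by_cases hxt : pvMaxPrio t ≤ pvPrio x
    · exact ⟨x, List.mem_cons_self, (max_eq_left hxt).symm⟩
    · have hmax : max (pvPrio x) (pvMaxPrio t) = pvMaxPrio t := max_eq_right (by omega)
      rw [hmax] at h ⊢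
      obtain ⟨s, hs, hps⟩ := ih h
      exact ⟨s, List.mem_cons_of_mem _ hs, hps⟩

lemma find?_prio_none {l : List String} {k : Int} (h : pvMaxPrio l < k) :
    l.find? (fun s => pvPrio s == k) = none := by
  rw [List.find?_eq_none]
  intro s hs
  have := pvPrio_le_maxPrio hs
  simp only [beq_iff_eq]; omega

lemma find?_prio_some {l : List String} (h : pvMaxPrio l ≠ 0) :
    (l.find? (fun s => pvPrio s == pvMaxPrio l)).isSome := by
  obtain ⟨s, hs, hps⟩ := pvExists_maxPrio h
  exact List.find?_isSome.2 ⟨s, hs, by simp [hps]⟩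

lemma pvScan_eq (l : List String) :
    pvScan l ["sha512", "sha384", "sha256", "sha1", "md5"] =
      if pvMaxPrio l = 0 then none else l.find? (fun s => pvPrio s == pvMaxPrio l) := by
  have hm0 := pvMaxPrio_nonneg l
  have hm5 := pvMaxPrio_le_five l
  have e5 : pvFindAlgo "sha512" l = l.find? (fun s => pvPrio s == 5) := by
    rw [pvFindAlgo_eq_find?]; congr 1; funext s; exact (pvAlgoMatches_iff_prio s).1
  have e4 : pvFindAlgo "sha384" l = l.find? (fun s => pvPrio s == 4) := by
    rw [pvFindAlgo_eq_find?]; congr 1; funext s; exact (pvAlgoMatches_iff_prio s).2.1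
  have e3 : pvFindAlgo "sha256" l = l.find? (fun s => pvPrio s == 3) := by
    rw [pvFindAlgo_eq_find?]; congr 1; funext s; exact (pvAlgoMatches_iff_prio s).2.2.1
  have e2 : pvFindAlgo "sha1" l = l.find? (fun s => pvPrio s == 2) := by
    rw [pvFindAlgo_eq_find?]; congr 1; funext s; exact (pvAlgoMatches_iff_prio s).2.2.2.1
  have e1 : pvFindAlgo "md5" l = l.find? (fun s => pvPrio s == 1) := by
    rw [pvFindAlgo_eq_find?]; congr 1; funext s; exact (pvAlgoMatches_iff_prio s).2.2.2.2
  simp only [pvScan, e5, e4, e3, e2, e1]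
  rcases (by omega : pvMaxPrio l = 0 ∨ pvMaxPrio l = 1 ∨ pvMaxPrio l = 2 ∨ pvMaxPrio l = 3 ∨
      pvMaxPrio l = 4 ∨ pvMaxPrio l = 5) with h | h | h | h | h | h
  · rw [find?_prio_none (by omega), find?_prio_none (by omega), find?_prio_none (by omega),
      find?_prio_none (by omega), find?_prio_none (by omega)]
    simp [h]
  all_goals (
    obtain ⟨s, hs⟩ := Option.isSome_iff_exists.1 (find?_prio_some (l := l) (by omega))
    rw [h] at hs
    rw [if_neg (by omega), h]
    try rw [find?_prio_none (by omega)]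
    try rw [find?_prio_none (by omega)]
    try rw [find?_prio_none (by omega)]
    try rw [find?_prio_none (by omega)]
    rw [hs]
    try simp)

-- a hash string that matches some algorithm contains ":"
lemma pvMatches_isIn {a s : String} (h : pvAlgoMatches a s = true) :
    PySem.Str.isIn ":" s = true := by
  unfold pvAlgoMatches at h
  rw [Bool.and_eq_true] at h
  exact h.1

-- a hash string that matches some algorithm contains ":" and so is non-empty
lemma pvPrio_pos_ne_empty {s : String} (h : 0 < pvPrio s) : s ≠ "" := by
  have hin : PySem.Str.isIn ":" s = true := by
    unfold pvPrio at h
    split_ifs at h with h5 h4 h3 h2 h1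
    · exact pvMatches_isIn h5
    · exact pvMatches_isIn h4
    · exact pvMatches_isIn h3
    · exact pvMatches_isIn h2
    · exact pvMatches_isIn h1
    · omega
  intro he
  rw [he] at hin
  exact absurd hin (by decide)

theorem pv_main (l : List String) : select_best_hash_py l = select_best_hash_py_alt l := by
  unfold select_best_hash_py select_best_hash_py_alt
  rw [pvScan_eq]
  cases l with
  | nil => simp
  | cons x t =>
    simp only [List.isEmpty_cons, if_neg (Bool.false_ne_true)]
    rw [foldl_stepA_eq_stepF (x :: t) none 0 le_rfl]
    by_cases h0 : pvMaxPrio (x :: t) = 0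
    · rw [foldl_stepF_unchanged (x :: t) none 0 (by omega)]
      simp [h0]
    · have hpos : 0 < pvMaxPrio (x :: t) := by
        have := pvMaxPrio_nonneg (x :: t); omega
      have hfound := foldl_stepF_found (x :: t) none 0 le_rfl hpos
      obtain ⟨s, hs⟩ := Option.isSome_iff_exists.1 (find?_prio_some h0)
      have hps : pvPrio s = pvMaxPrio (x :: t) := by
        have := List.find?_some hs
        simpa using this
      have hsne : s ≠ "" := pvPrio_pos_ne_empty (by omega)
      rw [hs] at hfound
      rw [hfound, hs]
      simp [h0, hsne]

-- ===== VERDICT (by name: the statement is the Claim_ definition above) =====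
theorem select_best_hash_py_spec : Claim_equal_select_best_hash_py := by
  intro l _
  unfold Spec_select_best_hash_py
  exact pv_main l
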